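-- pv_equiv track=rewrite | github.com/arbwasisi/CSC120 | triangle2.py | triangle2
-- ===== SOURCE A (Python) =====
-- def helper(array, inc):
--     """
--     Function takes an array containing the same value and it increment
--     each value by inc.
--     returns: An array that has been altered by incrementing its value.
--     array: An array of size num, containing the last value of the
--     previous sub list.
--     inc: A number to increment each value by.
--     """
--
--     if array == []:
--         return array
--     array[0] += inc
--     return array[:1] + helper(array[1:], inc+1)
--
-- def triangle2(num):
--     """
--     Function will create a triangular array, where the values within the
--     list, are integers from 1 to n.
--     returns: Triangular array.
--     num: Size of the array.
--     """
--
--     if num == 0: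
--         return []
--
--     if num == 1:
--         return [[1]]
--     # Traverse all the way down then work upwards
--     array = triangle2(num-1)
--     sub = helper([array[-1][-1]]*num,1)
--     array += [sub]
--     return array
-- ===== SOURCE B (Python) =====
-- def triangle2(num):
--     # Row k (1-based) holds the k consecutive integers ending at the
--     # k-th triangular number; compute each row's bounds in closed form.
--     return [list(range(k * (k - 1) // 2 + 1, k * (k + 1) // 2 + 1))
--             for k in range(1, num + 1)]
-- ===== Notes on version B (the rewrite author's own statement) =====
-- stated objective: faster
-- what changed: Replaces the recursive build (recurse to 1, then fix each new row with a slice-based recursive helper that copies the row on every step) by a single comprehension that computes each row's start/end from the triangular-number closed form.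
-- outside the precondition, e.g. on triangle2(-1): A raises RecursionError, B returns []
import Mathlib
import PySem

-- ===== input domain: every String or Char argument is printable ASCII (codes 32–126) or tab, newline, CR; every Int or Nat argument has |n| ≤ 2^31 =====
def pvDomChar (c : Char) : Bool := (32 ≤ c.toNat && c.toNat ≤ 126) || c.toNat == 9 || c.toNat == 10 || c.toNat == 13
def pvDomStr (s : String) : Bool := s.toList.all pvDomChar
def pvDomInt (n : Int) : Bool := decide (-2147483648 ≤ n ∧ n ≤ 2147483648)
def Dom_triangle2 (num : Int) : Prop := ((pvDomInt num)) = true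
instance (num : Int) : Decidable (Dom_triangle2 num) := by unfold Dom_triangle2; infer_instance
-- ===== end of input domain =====

-- B replaces A's O(num^3) recursive build (slice-copying helper per row) by a closed-form
-- row comprehension (O(num^2)); A mutates its internal lists only, no caller-visible mutation.


-- ===== PORT A =====
-- helper(array, inc): array[0] += inc; array[:1] + helper(array[1:], inc+1)
def pyHelper (array : List Int) (inc : Int) : List Int :=
  match array with
  | [] => []
  | a :: rest => (a + inc) :: pyHelper rest (inc + 1)

-- literal port of A; for num < 0 the Python recursion diverges (outside Pre_), the port returns []
def triangle2 (num : Int) : List (List Int) :=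
  if num = 0 then []
  else if num = 1 then [[1]]
  else if num < 0 then []   -- Python diverges here; excluded by Pre_triangle2
  else
    let array := triangle2 (num - 1)
    -- array[-1][-1]: both pyGet? are exact (some …) here since array and its last row are nonempty
    let sub := pyHelper
      (List.replicate num.toNat ((PySem.List.pyGet? ((PySem.List.pyGet? array (-1)).getD []) (-1)).getD 0)) 1
    array ++ [sub]
termination_by num.toNat
decreasing_by omega

-- ===== PORT B =====
def triangle2_alt (num : Int) : List (List Int) :=
  (PySem.List.pyRange 1 (num + 1) 1).map (fun k =>
    PySem.List.pyRange (PySem.Int.floordiv (k * (k - 1)) 2 + 1)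
                       (PySem.Int.floordiv (k * (k + 1)) 2 + 1) 1)

-- ===== PRECONDITION & SPEC =====
-- Pre_ excludes num < 0, where Python A exceeds the recursion limit (RecursionError).
def Pre_triangle2 (num : Int) : Prop := 0 ≤ num
instance (num : Int) : Decidable (Pre_triangle2 num) := by unfold Pre_triangle2; infer_instance
def pvWitness_triangle2 : Int := (3)

def Spec_triangle2 (num : Int) (out : List (List Int)) : Prop := out = triangle2_alt num
instance (num : Int) (out : List (List Int)) : Decidable (Spec_triangle2 num out) := by unfold Spec_triangle2; infer_instance

-- ===== CLAIM (what is proved, stated in full; the proofs are below) =====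
def Claim_equal_triangle2 : Prop := ∀ (num : Int), Dom_triangle2 num → Pre_triangle2 num → Spec_triangle2 num (triangle2 num)

-- ===== LEMMAS AND PROOFS =====

-- triN n = n-th triangular number, as an Int
def triN (n : Nat) : Int := ((n * (n + 1) / 2 : Nat) : Int)

theorem triN_succ (n : Nat) : triN (n + 1) = triN n + (n + 1) := by
  have h : (n + 1) * (n + 1 + 1) / 2 = n * (n + 1) / 2 + (n + 1) := by
    have h2 : (n + 1) * (n + 1 + 1) = n * (n + 1) + (n + 1) * 2 := by ring
    rw [h2]; omega
  unfold triN; rw [h]; push_cast; ring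

theorem helper_replicate (n : Nat) (v i : Int) :
    pyHelper (List.replicate n v) i = PySem.List.pyRange (v + i) (v + i + n) 1 := by
  induction n generalizing i with
  | zero => simp [pyHelper, PySem.List.pyRange_one_eq_nil]
  | succ m ih =>
    push_cast
    rw [List.replicate_succ]
    show (v + i) :: pyHelper (List.replicate m v) (i + 1) = _
    rw [ih (i + 1), PySem.List.pyRange_one_cons (a := v + i) (b := v + i + ((m : Int) + 1)) (by omega)]
    rw [show v + (i + 1) = v + i + 1 from by ring,
        show v + i + 1 + (m : Int) = v + i + ((m : Int) + 1) from by ring]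

theorem floordiv_tri (n : Nat) :
    PySem.Int.floordiv (((n : Int) + 1) * ((n : Int) + 1 - 1)) 2 = triN n := by
  have hdN : (n * (n + 1) / 2) * 2 = n * (n + 1) := Nat.div_mul_cancel (Nat.even_mul_succ_self n).two_dvd
  have hdI : (triN n) * 2 = (n : Int) * ((n : Int) + 1) := by unfold triN; exact_mod_cast congrArg (Nat.cast (R := Int)) hdN
  have h : ((n : Int) + 1) * ((n : Int) + 1 - 1) = 2 * triN n := by
    rw [show ((n : Int) + 1) * ((n : Int) + 1 - 1) = (n : Int) * ((n : Int) + 1) from by ring]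
    linarith [hdI]
  rw [h, PySem.Int.floordiv_eq_ediv_of_pos (by omega)]
  omega

theorem floordiv_tri' (n : Nat) :
    PySem.Int.floordiv (((n : Int) + 1) * ((n : Int) + 1 + 1)) 2 = triN (n + 1) := by
  have h := floordiv_tri (n + 1)
  push_cast at h
  rw [show ((n : Int) + 1) * ((n : Int) + 1 + 1) = ((n : Int) + 1 + 1) * ((n : Int) + 1 + 1 - 1) from by ring]
  exact h

theorem alt_succ (n : Nat) :
    triangle2_alt ((n : Int) + 1)
      = triangle2_alt (n : Int) ++ [PySem.List.pyRange (triN n + 1) (triN (n + 1) + 1) 1] := by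
  unfold triangle2_alt
  rw [show (n : Int) + 1 + 1 = ((n : Int) + 1) + 1 from rfl,
      PySem.List.pyRange_one_succ_right (by omega), List.map_append]
  congr 1
  rw [List.map_cons, List.map_nil, floordiv_tri n, floordiv_tri' n]

theorem lastlast_alt (n : Nat) (hn : 1 ≤ n) :
    ((PySem.List.pyGet? ((PySem.List.pyGet? (triangle2_alt (n : Int)) (-1)).getD []) (-1)).getD 0)
      = triN n := by
  obtain ⟨m, rfl⟩ : ∃ m, n = m + 1 := ⟨n - 1, by omega⟩
  push_cast [alt_succ m]
  rw [PySem.List.pyGet?_neg_one_append_singleton]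
  simp only [Option.getD_some]
  rw [show triN (m + 1) + 1 = (triN m + 1) + (m + 1) from by rw [triN_succ]; ring,
      show ((triN m + 1) + ((m:Int) + 1)) = ((triN m + 1) + (m:Int)) + 1 from by ring,
      PySem.List.pyRange_one_succ_right (by omega),
      PySem.List.pyGet?_neg_one_append_singleton]
  simp only [Option.getD_some]
  rw [triN_succ]; ring

theorem triangle2_eq_alt (n : Nat) : triangle2 (n : Int) = triangle2_alt (n : Int) := by
  induction n using Nat.strong_induction_on with
  | _ n ih =>
    match n with
    | 0 =>
      rw [triangle2]
      norm_num [triangle2_alt, PySem.List.pyRange_one_eq_nil (le_refl (1 : Int))]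
    | 1 =>
      rw [triangle2]
      norm_num [triangle2_alt]
      decide
    | (m + 2) =>
      rw [triangle2]
      have h0 : ¬ ((m : Int) + 2 = 0) := by omega
      have h1 : ¬ ((m : Int) + 2 = 1) := by omega
      have h2 : ¬ ((m : Int) + 2 < 0) := by omega
      push_cast
      rw [if_neg h0, if_neg h1, if_neg h2]
      have hm1 : ((m : Int) + 2) - 1 = ((m + 1 : Nat) : Int) := by push_cast; ring
      rw [hm1, ih (m + 1) (by omega)]
      rw [lastlast_alt (m + 1) (by omega)]
      rw [show (((m : Int) + 2)).toNat = m + 2 from by omega]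
      rw [helper_replicate (m + 2) (triN (m + 1)) 1]
      rw [show ((m + 1 : Nat) : Int) = (m : Int) + 1 from by push_cast; ring]
      have ha := alt_succ (m + 1)
      push_cast at ha
      rw [show (m : Int) + 2 = ((m : Int) + 1) + 1 from by ring, ha]
      congr 2
      congr 1
      rw [triN_succ (m + 1)]
      push_cast
      ring

-- ===== VERDICT (by name: the statement is the Claim_ definition above) =====
theorem triangle2_spec : Claim_equal_triangle2 := by
  intro num _ hpre
  unfold Pre_triangle2 at hpre
  unfold Spec_triangle2
  have h : num = ((num.toNat : Nat) : Int) := by omega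
  rw [h]
  exact triangle2_eq_alt num.toNat
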